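-- pv_equiv track=rewrite | github.com/CathyKitten/UIAgent_Tutorial | ufo/agents/video/tool/gen_video.py | _wrap_title_intelligently
-- ===== SOURCE A (Python) =====
-- from typing import List, Tuple
-- import math
--
-- def _wrap_title_intelligently(text: str, num_lines: int) -> List[str]:
--     # (此函數未變動)
--     if num_lines <= 1:
--         return [text]
--
--     words = text.split()
--     if not words or len(words) < num_lines:
--         return text.splitlines() if '\n' in text else [text]
--
--     lines = []
--     word_idx = 0
--     for i in range(num_lines):
--         remaining_lines = num_lines - i
--         remaining_words = len(words) - word_idx
--
--         if remaining_lines == 1: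
--             words_for_this_line = remaining_words
--         else:
--             words_for_this_line = math.ceil(remaining_words / remaining_lines)
--             words_for_this_line = min(words_for_this_line, remaining_words - (remaining_lines - 1))
--
--         words_for_this_line = max(1, int(words_for_this_line))
--
--         end_idx = word_idx + words_for_this_line
--         lines.append(" ".join(words[word_idx:end_idx]))
--         word_idx = end_idx
--
--         if word_idx >= len(words):
--             break
--
--     return [line for line in lines if line]
-- ===== SOURCE B (Python) =====
-- from typing import List
--
--
-- def _wrap_title_intelligently(text: str, num_lines: int) -> List[str]:
--     if num_lines <= 1:
--         return [text]
--
--     words = text.split()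
--     if not words or len(words) < num_lines:
--         return text.splitlines() if '\n' in text else [text]
--
--     # Closed-form balanced partition: the first `extra` lines get one extra word.
--     base, extra = divmod(len(words), num_lines)
--     sizes = [base + 1] * extra + [base] * (num_lines - extra)
--
--     lines = []
--     pos = 0
--     for size in sizes:
--         lines.append(" ".join(words[pos:pos + size]))
--         pos += size
--     return lines
-- ===== Notes on version B (the rewrite author's own statement) =====
-- stated objective: simpler
-- what changed: Replaces A's greedy per-iteration ceil/min/max recomputation (with break and post-filter) by a closed-form divmod size table computed up front and a single cursor walk slicing off sizes[i] words per line.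
import Mathlib
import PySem

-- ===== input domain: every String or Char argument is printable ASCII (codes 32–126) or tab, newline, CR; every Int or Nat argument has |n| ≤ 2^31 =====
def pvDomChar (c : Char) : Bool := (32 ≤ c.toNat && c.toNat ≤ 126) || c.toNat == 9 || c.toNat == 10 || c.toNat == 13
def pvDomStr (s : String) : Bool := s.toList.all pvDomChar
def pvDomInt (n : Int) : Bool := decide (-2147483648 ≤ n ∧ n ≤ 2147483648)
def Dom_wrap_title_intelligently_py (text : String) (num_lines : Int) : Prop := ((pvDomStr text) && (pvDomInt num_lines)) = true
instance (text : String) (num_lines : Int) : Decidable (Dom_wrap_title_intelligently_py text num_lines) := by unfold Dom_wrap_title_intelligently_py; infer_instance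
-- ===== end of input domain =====

-- B replaces A's greedy per-iteration ceil/min/max word-count recomputation (with break and
-- trailing filter) by a closed-form divmod size table computed up front plus one cursor walk
-- (objective: simpler; same asymptotic cost).

-- ===== PORT A =====
-- math.ceil(a / b) ported as exact integer ceiling -((-a) // b); exact here because the float
-- division:  both operands are word counts far below 2^53
def pvCeil (a b : Int) : Int := -(PySem.Int.floordiv (-a) b)

-- A's `for i in range(num_lines)` loop with its `break`; `rem` counts the iterations still to
-- come, so `rem = num_lines - i` is exactly A's `remaining_lines`
def pvALoop (words : List String) (rem : Nat) (word_idx : Int) : List String :=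
  match rem with
  | 0 => []
  | r + 1 =>
    let remaining_lines : Int := (r : Int) + 1
    let remaining_words : Int := (words.length : Int) - word_idx
    let w0 : Int :=
      if remaining_lines = 1 then remaining_words
      else min (pvCeil remaining_words remaining_lines)
               (remaining_words - (remaining_lines - 1))
    let wtl : Int := max 1 w0
    let end_idx : Int := word_idx + wtl
    let line : String := PySem.Str.join " " (PySem.List.slice words (some word_idx) (some end_idx))
    if (words.length : Int) ≤ end_idx then [line]
    else line :: pvALoop words r end_idx

def wrap_title_intelligently_py (text : String) (num_lines : Int) : List String :=
  if num_lines ≤ 1 then [text]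
  else
    let words := PySem.Str.split₀ text
    if words = [] ∨ (words.length : Int) < num_lines then
      (if PySem.Str.isIn "\n" text then PySem.Str.splitlines text else [text])
    else
      (pvALoop words num_lines.toNat 0).filter (fun line => line ≠ "")

-- ===== PORT B =====
-- B's cursor walk: one line of `sizes[i]` words sliced off per step
def pvBChunks (words : List String) : List Int → Int → List String
  | [], _ => []
  | s :: rest, pos =>
      PySem.Str.join " " (PySem.List.slice words (some pos) (some (pos + s)))
        :: pvBChunks words rest (pos + s)

def wrap_title_intelligently_py_alt (text : String) (num_lines : Int) : List String :=
  if num_lines ≤ 1 then [text]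
  else
    let words := PySem.Str.split₀ text
    if words = [] ∨ (words.length : Int) < num_lines then
      (if PySem.Str.isIn "\n" text then PySem.Str.splitlines text else [text])
    else
      let base := PySem.Int.floordiv (words.length : Int) num_lines
      let extra := PySem.Int.mod (words.length : Int) num_lines
      let sizes := List.replicate extra.toNat (base + 1) ++ List.replicate (num_lines - extra).toNat base
      pvBChunks words sizes 0

-- ===== PRECONDITION & SPEC =====
def Spec_wrap_title_intelligently_py (text : String) (num_lines : Int) (out : List String) : Prop := out = wrap_title_intelligently_py_alt text num_lines
instance (text : String) (num_lines : Int) (out : List String) : Decidable (Spec_wrap_title_intelligently_py text num_lines out) := by unfold Spec_wrap_title_intelligently_py; infer_instance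

-- ===== CLAIM (what is proved, stated in full; the proofs are below) =====
def Claim_equal_wrap_title_intelligently_py : Prop := ∀ (text : String) (num_lines : Int), Dom_wrap_title_intelligently_py text num_lines → Spec_wrap_title_intelligently_py text num_lines (wrap_title_intelligently_py text num_lines)

-- ===== LEMMAS AND PROOFS =====

-- B's size table for m words over k lines, as a function on Nats
def pvSizes (m k : Nat) : List Int :=
  List.replicate (m % k) ((m / k : Nat) + 1 : Int) ++ List.replicate (k - m % k) ((m / k : Nat) : Int)

-- Nat ceiling division
def pvCeilN (m k : Nat) : Nat := (m + k - 1) / k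

lemma pvCeilN_eq (m k : Nat) (hk : 0 < k) :
    pvCeilN m k = if m % k = 0 then m / k else m / k + 1 := by
  have hd := Nat.div_add_mod m k
  have hmod : m % k < k := Nat.mod_lt _ hk
  unfold pvCeilN
  split_ifs with h0
  · have h1 : m + k - 1 = k * (m / k) + (k - 1) := by omega
    rw [h1, Nat.mul_add_div hk, Nat.div_eq_of_lt (show k - 1 < k by omega)]
    omega
  · have hb : k * (m / k + 1) = k * (m / k) + k := by ring
    have h1 : m + k - 1 = k * (m / k + 1) + (m % k - 1) := by omega
    rw [h1, Nat.mul_add_div hk, Nat.div_eq_of_lt (show m % k - 1 < k by omega)]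

lemma pvCeil_natCast (m k : Nat) (hk : 0 < k) :
    pvCeil (m : Int) (k : Int) = (pvCeilN m k : Int) := by
  unfold pvCeil
  rw [PySem.Int.neg_floordiv_neg_eq_iff_of_pos (show (0:Int) < k by exact_mod_cast hk)]
  have hd := Nat.div_add_mod m k
  have hmod : m % k < k := Nat.mod_lt _ hk
  have hkz : (1:Int) ≤ (k:Int) := by exact_mod_cast hk
  rw [pvCeilN_eq m k hk]
  rcases Nat.eq_zero_or_pos (m % k) with h0 | hpos
  · have hq : (k:Int) * ((m / k : Nat) : Int) = (m : Int) := by exact_mod_cast (by omega : k * (m / k) = m)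
    rw [if_pos h0]
    constructor <;> nlinarith [hq, hkz]
  · have hq : (k:Int) * ((m / k : Nat) : Int) + ((m % k : Nat) : Int) = (m : Int) := by exact_mod_cast hd
    have h1 : (1:Int) ≤ ((m % k : Nat) : Int) := by exact_mod_cast hpos
    have h2 : ((m % k : Nat) : Int) < (k : Int) := by exact_mod_cast hmod
    rw [if_neg (by omega), Nat.cast_add, Nat.cast_one]
    constructor <;> nlinarith [hq, h1, h2]

lemma pvCeilN_le (m k : Nat) (hk : 1 ≤ k) (hm : k ≤ m) : pvCeilN m k ≤ m - (k - 1) := by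
  obtain ⟨k', rfl⟩ : ∃ k', k = k' + 1 := ⟨k - 1, by omega⟩
  have hd := Nat.div_add_mod m (k' + 1)
  have hmod : m % (k' + 1) < k' + 1 := Nat.mod_lt _ (by omega)
  have hq : 1 ≤ m / (k' + 1) := Nat.one_le_div_iff (by omega) |>.mpr hm
  have hb : (k' + 1) * (m / (k' + 1)) = k' * (m / (k' + 1)) + m / (k' + 1) := by ring
  have hkq : k' * 1 ≤ k' * (m / (k' + 1)) := Nat.mul_le_mul_left _ hq
  rw [pvCeilN_eq m (k' + 1) (by omega)]
  split_ifs with h0 <;> omega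

lemma pvCeilN_pos (m k : Nat) (hk : 1 ≤ k) (hm : k ≤ m) : 1 ≤ pvCeilN m k := by
  have hq : 1 ≤ m / k := Nat.one_le_div_iff (by omega) |>.mpr hm
  rw [pvCeilN_eq m k (by omega)]
  split_ifs <;> omega

lemma pvSizes_one (m : Nat) : pvSizes m 1 = [(m : Int)] := by
  simp [pvSizes, Nat.mod_one]

-- the greedy first-line word count is exactly the head of the balanced size table
lemma pvSizes_cons (m k : Nat) (hk : 2 ≤ k) (hm : k ≤ m) :
    pvSizes m k = ((pvCeilN m k : Nat) : Int) :: pvSizes (m - pvCeilN m k) (k - 1) := by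
  obtain ⟨k', rfl⟩ : ∃ k', k = k' + 1 := ⟨k - 1, by omega⟩
  have hd := Nat.div_add_mod m (k' + 1)
  have hmod : m % (k' + 1) < k' + 1 := Nat.mod_lt _ (by omega)
  have hb : (k' + 1) * (m / (k' + 1)) = k' * (m / (k' + 1)) + m / (k' + 1) := by ring
  set q := m / (k' + 1) with hqdef
  set r := m % (k' + 1) with hrdef
  clear_value q r
  rw [pvCeilN_eq m (k' + 1) (by omega), ← hrdef, ← hqdef]
  rcases Nat.eq_zero_or_pos r with h0 | hpos
  · have hm' : m - q = k' * q := by omega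
    have hdiv : (m - q) / k' = q := by rw [hm', Nat.mul_div_cancel_left _ (by omega)]
    have hmod' : (m - q) % k' = 0 := by rw [hm', Nat.mul_mod_right]
    rw [if_pos h0]
    show pvSizes m (k' + 1) = (q : Int) :: pvSizes (m - q) (k' + 1 - 1)
    unfold pvSizes
    rw [show k' + 1 - 1 = k' by omega, hdiv, hmod', ← hrdef, ← hqdef, h0]
    simp [List.replicate_succ]
  · have hm' : m - (q + 1) = k' * q + (r - 1) := by omega
    have hr1 : r - 1 < k' := by omega
    have hdiv : (m - (q + 1)) / k' = q := by
      rw [hm', Nat.mul_add_div (by omega), Nat.div_eq_of_lt hr1]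
      omega
    have hmod' : (m - (q + 1)) % k' = r - 1 := by
      rw [hm', Nat.mul_add_mod, Nat.mod_eq_of_lt hr1]
    rw [if_neg (by omega)]
    show pvSizes m (k' + 1) = ((q + 1 : Nat) : Int) :: pvSizes (m - (q + 1)) (k' + 1 - 1)
    unfold pvSizes
    rw [show k' + 1 - 1 = k' by omega, hdiv, hmod', ← hrdef, ← hqdef]
    obtain ⟨r', rfl⟩ : ∃ r', r = r' + 1 := ⟨r - 1, by omega⟩
    simp only [Nat.add_sub_cancel, List.replicate_succ, List.cons_append]
    push_cast
    congr 1

-- one unfolding step of A's loop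
lemma pvALoop_succ (words : List String) (r : Nat) (word_idx : Int) :
    pvALoop words (r + 1) word_idx =
      (let remaining_lines : Int := (r : Int) + 1
       let remaining_words : Int := (words.length : Int) - word_idx
       let w0 : Int :=
         if remaining_lines = 1 then remaining_words
         else min (pvCeil remaining_words remaining_lines)
                  (remaining_words - (remaining_lines - 1))
       let wtl : Int := max 1 w0
       let end_idx : Int := word_idx + wtl
       let line : String := PySem.Str.join " " (PySem.List.slice words (some word_idx) (some end_idx))
       if (words.length : Int) ≤ end_idx then [line]
       else line :: pvALoop words r end_idx) := rfl

-- the loop correspondence: A's greedy loop produces exactly B's table-driven chunks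
lemma pvALoop_eq_chunks (r : Nat) : ∀ (j : Nat) (words : List String),
    j + (r + 1) ≤ words.length →
    pvALoop words (r + 1) (j : Int) = pvBChunks words (pvSizes (words.length - j) (r + 1)) (j : Int) := by
  induction r with
  | zero =>
    intro j words h
    have hn : j + 1 ≤ words.length := h
    rw [pvSizes_one]
    rw [pvALoop_succ]
    simp only [pvALoop, pvBChunks, Nat.cast_zero, zero_add, if_true, ite_self]
    rw [max_eq_right (by omega : (1:Int) ≤ (words.length : Int) - (j:Int))]
    have h1 : (j : Int) + ((words.length : Int) - (j : Int)) = (words.length : Int) := by ring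
    have h2 : (j : Int) + ((words.length - j : Nat) : Int) = (words.length : Int) := by
      push_cast [Nat.cast_sub (by omega : j ≤ words.length)]; ring
    rw [h1, h2]
  | succ r ih =>
    intro j words h
    have hjn : j ≤ words.length := by omega
    have hm : r + 2 ≤ words.length - j := by omega
    have hcle : pvCeilN (words.length - j) (r + 2) ≤ (words.length - j) - (r + 1) := by
      have := pvCeilN_le (words.length - j) (r + 2) (by omega) hm
      simpa using this
    have hcpos : 1 ≤ pvCeilN (words.length - j) (r + 2) := pvCeilN_pos _ _ (by omega) hm
    have hrw : (words.length : Int) - (j : Int) = ((words.length - j : Nat) : Int) := by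
      push_cast [Nat.cast_sub hjn]; ring
    have hden : ((r + 1 : Nat) : Int) + 1 = ((r + 2 : Nat) : Int) := by push_cast; ring
    rw [pvALoop_succ]
    simp only []
    rw [if_neg (by push_cast; omega), hrw, hden, pvCeil_natCast _ _ (by omega)]
    rw [min_eq_left (by
      have : pvCeilN (words.length - j) (r + 2) + (r + 1) ≤ words.length - j := by omega
      push_cast
      omega)]
    rw [max_eq_right (by exact_mod_cast hcpos)]
    rw [if_neg (show ¬ (((r + 2 : Nat) : Int) = 1) by push_cast; omega)]
    have hend : (j : Int) + (pvCeilN (words.length - j) (r + 2) : Int) = ((j + pvCeilN (words.length - j) (r + 2) : Nat) : Int) := by push_cast; ring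
    rw [hend]
    rw [ih (j + pvCeilN (words.length - j) (r + 2)) words (by omega)]
    rw [pvSizes_cons (words.length - j) (r + 2) (by omega) hm]
    simp only [pvBChunks]
    rw [show r + 2 - 1 = r + 1 by omega]
    rw [show words.length - (j + pvCeilN (words.length - j) (r + 2)) = (words.length - j) - pvCeilN (words.length - j) (r + 2) by omega]
    rw [hend]

-- every word text.split() yields is nonempty
lemma split₀_go_ne_nil (s : List Char) : ∀ (cur : List Char) (acc : List (List Char)),
    (∀ w ∈ acc, w ≠ []) → ∀ w ∈ PySem.Chars.split₀.go s cur acc, w ≠ [] := by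
  induction s with
  | nil =>
    intro cur acc hacc w hw
    simp only [PySem.Chars.split₀.go] at hw
    split_ifs at hw with hemp
    · exact hacc w (by simpa using hw)
    · rcases (by simpa using hw : w ∈ acc ∨ w = cur.reverse) with h | h
      · exact hacc w h
      · subst h
        simp_all [List.isEmpty_iff]
  | cons c rest ih =>
    intro cur acc hacc w hw
    simp only [PySem.Chars.split₀.go] at hw
    split_ifs at hw with hsp hemp
    · exact ih [] acc hacc w hw
    · refine ih [] (cur.reverse :: acc) ?_ w hw
      intro v hv
      rcases List.mem_cons.mp hv with h | h
      · subst h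
        simp_all [List.isEmpty_iff]
      · exact hacc v h
    · exact ih (c :: cur) acc hacc w hw

lemma str_split₀_ne_empty (text : String) : ∀ w ∈ PySem.Str.split₀ text, w ≠ "" := by
  intro w hw
  have h2 : w.toList ∈ PySem.Chars.split₀ text.toList := by
    rw [← PySem.Str.split₀_map_toList]
    exact List.mem_map_of_mem hw
  have := split₀_go_ne_nil text.toList [] [] (by simp) w.toList h2
  intro hcontra
  exact this (by simp [hcontra])

-- " ".join of a nonempty list of nonempty words is nonempty
lemma join_ne_empty (ws : List String) (hne : ws ≠ []) (h : ∀ w ∈ ws, w ≠ "") :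
    PySem.Str.join " " ws ≠ "" := by
  match ws, hne with
  | [w], _ =>
    simp only [PySem.Str.join, List.map]
    rw [show PySem.Chars.join " ".toList [w.toList] = w.toList from PySem.Chars.join_singleton _ _]
    have hw := h w (by simp)
    intro hc
    have h2 := congrArg String.toList hc
    simp at h2
    exact hw h2
  | w :: v :: rest, _ =>
    simp only [PySem.Str.join, List.map]
    rw [PySem.Chars.join_cons_cons]
    intro hc
    have h2 := congrArg String.toList hc
    simp at h2

lemma pvSizes_sum (m k : Nat) (hk : 0 < k) : (pvSizes m k).sum = (m : Int) := by
  have hd := Nat.div_add_mod m k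
  have hmod : m % k < k := Nat.mod_lt _ hk
  unfold pvSizes
  rw [List.sum_append, List.sum_replicate, List.sum_replicate]
  obtain ⟨d, hdk⟩ : ∃ d, k = m % k + d := ⟨k - m % k, by omega⟩
  have hnat : (m % k) * (m / k + 1) + d * (m / k) = m := by nlinarith [hd, hdk]
  simp only [nsmul_eq_mul]
  rw [show k - m % k = d by omega]
  exact_mod_cast hnat

lemma pvSizes_mem_pos (m k : Nat) (hk : 0 < k) (hm : k ≤ m) : ∀ s ∈ pvSizes m k, 1 ≤ s := by
  intro s hs
  have hq : 1 ≤ m / k := Nat.one_le_div_iff hk |>.mpr hm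
  unfold pvSizes at hs
  rcases List.mem_append.mp hs with h | h
  · have := List.eq_of_mem_replicate h
    subst this
    have : (1 : Int) ≤ ((m / k : Nat) : Int) := by exact_mod_cast hq
    omega
  · have := List.eq_of_mem_replicate h
    subst this
    exact_mod_cast hq

lemma sum_nonneg_of_one_le (sizes : List Int) (h : ∀ s ∈ sizes, 1 ≤ s) : 0 ≤ sizes.sum := by
  induction sizes with
  | nil => simp
  | cons s rest ih =>
    simp only [List.sum_cons]
    have h1 := h s (by simp)
    have h2 := ih (fun x hx => h x (List.mem_cons_of_mem _ hx))
    omega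

-- all chunks B emits are nonempty, so A's trailing filter is the identity
lemma filter_pvBChunks (words : List String) (hw : ∀ w ∈ words, w ≠ "") :
    ∀ (sizes : List Int) (pos : Nat),
    (∀ s ∈ sizes, 1 ≤ s) → (pos : Int) + sizes.sum ≤ (words.length : Int) →
    (pvBChunks words sizes (pos : Int)).filter (fun line => line ≠ "") = pvBChunks words sizes (pos : Int) := by
  intro sizes
  induction sizes with
  | nil => intro pos _ _; simp [pvBChunks]
  | cons s rest ih =>
    intro pos hpos hsum
    have hs1 : 1 ≤ s := hpos s (by simp)
    have hrest : ∀ x ∈ rest, 1 ≤ x := fun x hx => hpos x (List.mem_cons_of_mem _ hx)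
    have hrsum : 0 ≤ rest.sum := sum_nonneg_of_one_le rest hrest
    have hsum' : (pos : Int) + s + rest.sum ≤ (words.length : Int) := by
      simp only [List.sum_cons] at hsum; omega
    have hposlt : pos + s.toNat ≤ words.length := by omega
    have hslice : PySem.List.slice words (some (pos : Int)) (some ((pos : Int) + s)) = (words.drop pos).take s.toNat := by
      rw [show (s : Int) = ((s.toNat : Nat) : Int) by omega]
      exact PySem.List.slice_natCast_add words pos s.toNat
    have hchunk_ne : PySem.Str.join " " (PySem.List.slice words (some (pos : Int)) (some ((pos : Int) + s))) ≠ "" := by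
      apply join_ne_empty
      · rw [hslice]
        have hplt : pos < words.length := by omega
        have : (words.drop pos) ≠ [] := by
          intro hc; have := List.drop_eq_nil_iff.mp hc; omega
        intro hc
        rcases List.exists_cons_of_ne_nil this with ⟨a, tl, hd⟩
        rw [hd] at hc
        have : 1 ≤ s.toNat := by omega
        cases hn : s.toNat with
        | zero => omega
        | succ t => rw [hn] at hc; simp [List.take_succ_cons] at hc
      · intro v hv
        exact hw v (PySem.List.mem_of_mem_slice words (some (pos : Int)) (some ((pos : Int) + s)) hv)
    simp only [pvBChunks]
    rw [List.filter_cons_of_pos (by simpa using hchunk_ne)]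
    have hre : (pos : Int) + s = ((pos + s.toNat : Nat) : Int) := by omega
    rw [hre, ih (pos + s.toNat) hrest (by push_cast; omega)]

theorem pv_main_eq (text : String) (num_lines : Int) :
    wrap_title_intelligently_py text num_lines = wrap_title_intelligently_py_alt text num_lines := by
  unfold wrap_title_intelligently_py wrap_title_intelligently_py_alt
  by_cases h1 : num_lines ≤ 1
  · simp [h1]
  · rw [if_neg h1, if_neg h1]
    simp only []
    by_cases h2 : PySem.Str.split₀ text = [] ∨ ((PySem.Str.split₀ text).length : Int) < num_lines
    · rw [if_pos h2, if_pos h2]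
    · rw [if_neg h2, if_neg h2]
      have hlen : num_lines ≤ ((PySem.Str.split₀ text).length : Int) :=
        le_of_not_gt fun hc => h2 (Or.inr hc)
      set words := PySem.Str.split₀ text with hwords
      set n := words.length with hn
      have hk2 : 2 ≤ num_lines := by omega
      have hknat : num_lines = ((num_lines.toNat : Nat) : Int) := by omega
      set k := num_lines.toNat with hkdef
      have hk2n : 2 ≤ k := by omega
      have hkn : k ≤ n := by omega
      have hA : pvALoop words k 0 = pvBChunks words (pvSizes n k) 0 := by
        have := pvALoop_eq_chunks (k - 1) 0 words (by omega)
        rw [show k - 1 + 1 = k by omega] at this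
        simpa using this
      have hbase : PySem.Int.floordiv (n : Int) num_lines = ((n / k : Nat) : Int) := by
        rw [hknat]; exact_mod_cast PySem.Int.floordiv_natCast n k
      have hextra : PySem.Int.mod (n : Int) num_lines = ((n % k : Nat) : Int) := by
        rw [hknat]; exact_mod_cast PySem.Int.mod_natCast n k
      have hsizes : List.replicate (PySem.Int.mod (n : Int) num_lines).toNat (PySem.Int.floordiv (n : Int) num_lines + 1) ++
          List.replicate (num_lines - PySem.Int.mod (n : Int) num_lines).toNat (PySem.Int.floordiv (n : Int) num_lines) = pvSizes n k := by
        rw [hbase, hextra]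
        unfold pvSizes
        rw [Int.toNat_natCast, show (num_lines - ((n % k : Nat) : Int)).toNat = k - n % k by omega]
      rw [hA, hsizes]
      have hwnz : ∀ w ∈ words, w ≠ "" := str_split₀_ne_empty text
      have := filter_pvBChunks words hwnz (pvSizes n k) 0
        (pvSizes_mem_pos n k (by omega) hkn)
        (by rw [pvSizes_sum n k (by omega)]; push_cast; omega)
      simpa using this

-- ===== VERDICT (by name: the statement is the Claim_ definition above) =====
theorem wrap_title_intelligently_py_spec : Claim_equal_wrap_title_intelligently_py := by
  intro text num_lines _
  unfold Spec_wrap_title_intelligently_py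
  exact pv_main_eq text num_lines
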